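-- pv_equiv track=rewrite | github.com/AlexanderShaw/portfolio-eg | app/derive_scouting_features.py | find_plateau
-- ===== SOURCE A (Python) =====
-- def find_plateau(_list, threshold):
--     """
--     This function finds the value of the first non-zero plateau of *threshold* many numbers in a row in a list.
--     """
--     j = 0
--     i = 0
--     while i < threshold:
--         hp_from_death = _list
--         if hp_from_death[j] == hp_from_death[j+1] and hp_from_death[j] != 0:
--             i += 1
--         else:
--             i = 0
--         j += 1
--
--     return hp_from_death[j]
-- ===== SOURCE B (Python) =====
-- def find_plateau(_list, threshold):
--     """
--     Value of the first maximal run of equal non-zero numbers containing at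
--     least `threshold` adjacent equal pairs (i.e. run length >= threshold+1).
--     Run-based scan instead of A's pair-counting loop.
--     """
--     if threshold < 1:
--         raise ValueError("threshold must be a positive count")
--     i = 0
--     n = len(_list)
--     while i < n:
--         j = i
--         while j < n and _list[j] == _list[i]:
--             j += 1
--         if _list[i] != 0 and j - i >= threshold + 1:
--             return _list[i]
--         i = j
--     raise ValueError("no plateau found")
-- ===== Notes on version B (the rewrite author's own statement) =====
-- stated objective: alternative
-- what changed: Replaces A's single pair-by-pair success-counter loop (with resets) by a two-level scan over maximal runs of equal values: find each run's end, return its value when it is non-zero and long enough.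
import Mathlib
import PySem

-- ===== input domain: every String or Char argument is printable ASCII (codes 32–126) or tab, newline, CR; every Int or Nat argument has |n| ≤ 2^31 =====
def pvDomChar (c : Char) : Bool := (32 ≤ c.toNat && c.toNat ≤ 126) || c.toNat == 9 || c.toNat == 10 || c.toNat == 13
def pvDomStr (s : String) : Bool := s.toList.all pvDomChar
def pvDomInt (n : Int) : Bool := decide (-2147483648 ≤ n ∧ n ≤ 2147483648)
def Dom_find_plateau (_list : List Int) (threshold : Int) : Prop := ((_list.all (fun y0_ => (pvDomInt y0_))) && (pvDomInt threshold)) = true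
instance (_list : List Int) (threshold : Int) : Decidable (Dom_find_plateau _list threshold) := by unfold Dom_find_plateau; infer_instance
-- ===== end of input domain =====

-- B replaces A's pair-by-pair success-counter loop by a scan over maximal runs of equal values; same O(n) cost.


-- ===== PORT A =====
-- A's while loop, fuel-guarded for totality (fuel is never exhausted on inputs
-- satisfying Pre_find_plateau; 0 stands for Python's IndexError/NameError).
def loopA (l : List Int) (t : Int) : Nat → Nat → Nat → Int
  | 0, _, _ => 0
  | fuel+1, j, i =>
    if (i : Int) < t then
      match PySem.List.pyGet? l (j : Int), PySem.List.pyGet? l ((j : Int) + 1) with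
      | some a, some b =>
        if a = b ∧ a ≠ 0 then loopA l t fuel (j+1) (i+1) else loopA l t fuel (j+1) 0
      | _, _ => 0
    else ((PySem.List.pyGet? l (j : Int)).getD 0)

def find_plateau (_list : List Int) (threshold : Int) : Int :=
  loopA _list threshold (_list.length + 1) 0 0

-- ===== PORT B =====
-- inner while loop of Source B: end (exclusive) of the run of value v starting at j
def runEnd (l : List Int) (v : Int) (j : Nat) : Nat :=
  if j < l.length then (if l.getD j 0 = v then runEnd l v (j+1) else j) else j
termination_by l.length - j
decreasing_by omega

theorem runEnd_ge (l : List Int) (v : Int) (j : Nat) : j ≤ runEnd l v j := by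
  fun_induction runEnd l v j with
  | case1 j h hv ih => omega
  | case2 j h hv => omega
  | case3 j h => omega

-- outer while loop of Source B (the out-of-range branch stands for Source B's ValueError)
def outerB (l : List Int) (t : Int) (i : Nat) : Int :=
  if hi : i < l.length then
    if l.getD i 0 ≠ 0 ∧ t + 1 ≤ (runEnd l (l.getD i 0) i : Int) - (i : Int) then l.getD i 0
    else outerB l t (runEnd l (l.getD i 0) i)
  else 0
termination_by l.length - i
decreasing_by
  have h2 : i < runEnd l (l.getD i 0) i := by
    rw [runEnd, if_pos hi, if_pos rfl]
    exact Nat.lt_of_lt_of_le (Nat.lt_succ_self i) (runEnd_ge l (l.getD i 0) (i+1))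
  omega

-- the guard's 0 stands for Source B's ValueError on a non-positive threshold (outside Pre_)
def find_plateau_alt (_list : List Int) (threshold : Int) : Int :=
  if threshold < 1 then 0 else outerB _list threshold 0

-- ===== PRECONDITION & SPEC =====
-- Pre_ is exactly where the Python A returns: threshold ≥ 1 and some window of
-- threshold+1 equal non-zero values exists (otherwise A raises NameError or IndexError).
def Pre_find_plateau (_list : List Int) (threshold : Int) : Prop :=
  1 ≤ threshold ∧ ∃ s ∈ List.range _list.length,
    s + threshold.toNat < _list.length ∧ _list.getD s 0 ≠ 0 ∧
    ∀ k ∈ List.range (threshold.toNat + 1), _list.getD (s + k) 0 = _list.getD s 0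

instance (_list : List Int) (threshold : Int) : Decidable (Pre_find_plateau _list threshold) := by
  unfold Pre_find_plateau; infer_instance

def pvWitness_find_plateau : List Int × Int := ([0, 2, 2, 2, 5], 2)

def Spec_find_plateau (_list : List Int) (threshold : Int) (out : Int) : Prop := out = find_plateau_alt _list threshold
instance (_list : List Int) (threshold : Int) (out : Int) : Decidable (Spec_find_plateau _list threshold out) := by unfold Spec_find_plateau; infer_instance

-- ===== CLAIM (what is proved, stated in full; the proofs are below) =====
def Claim_equal_find_plateau : Prop := ∀ (_list : List Int) (threshold : Int), Dom_find_plateau _list threshold → Pre_find_plateau _list threshold → Spec_find_plateau _list threshold (find_plateau _list threshold)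

-- ===== LEMMAS AND PROOFS =====

theorem pyGet_nat (l : List Int) (j : Nat) (h : j < l.length) :
    PySem.List.pyGet? l (j : Int) = some (l.getD j 0) := by
  simp [PySem.List.pyGet?_natCast, List.getElem?_eq_getElem h, List.getD_eq_getElem?_getD]

-- A's loop succeeds: with m more successful pairs ahead, it returns l[j+m]
theorem loopA_succ (l : List Int) (t : Int) (ht : 1 ≤ t) :
    ∀ m f j i, i + m = t.toNat → j + m < l.length → l.getD j 0 ≠ 0 →
    (∀ k ≤ m, l.getD (j + k) 0 = l.getD j 0) →
    loopA l t (f + m + 1) j i = l.getD (j + m) 0 := by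
  intro m
  induction m with
  | zero =>
    intro f j i hi hb _ _
    have hit : ¬ ((i : Int) < t) := by omega
    simp [loopA, hit, pyGet_nat l j (by omega)]
  | succ m ih =>
    intro f j i hi hb hnz hrun
    have hit : (i : Int) < t := by omega
    have e0 : PySem.List.pyGet? l (j : Int) = some (l.getD j 0) := pyGet_nat l j (by omega)
    have e1 : PySem.List.pyGet? l ((j : Int) + 1) = some (l.getD (j+1) 0) := by
      have := pyGet_nat l (j+1) (by omega); push_cast at this ⊢; exact this
    have heq : l.getD (j+1) 0 = l.getD j 0 := hrun 1 (by omega)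
    rw [show j + (m+1) = (j+1) + m by omega]
    have step : loopA l t (f + (m+1) + 1) j i = loopA l t (f + m + 1) (j+1) (i+1) := by
      show loopA l t ((f + m + 1) + 1) j i = _
      rw [loopA, if_pos hit, e0, e1]
      show (if (l.getD j 0 = l.getD (j+1) 0 ∧ l.getD j 0 ≠ 0) then loopA l t (f+m+1) (j+1) (i+1) else loopA l t (f+m+1) (j+1) 0) = _
      rw [if_pos ⟨heq.symm, hnz⟩]
    rw [step]
    exact ih f (j+1) (i+1) (by omega) (by omega) (by rw [heq]; exact hnz)
      (by intro k hk; rw [heq, show j + 1 + k = j + (k+1) by omega]; exact hrun (k+1) (by omega))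

-- A's loop walks through a run of zeros without changing the counter
theorem loopA_zero (l : List Int) (t : Int) (ht : 1 ≤ t) :
    ∀ m f j, j + m < l.length → (∀ k < m, l.getD (j + k) 0 = 0) →
    loopA l t (f + m) j 0 = loopA l t f (j + m) 0 := by
  intro m
  induction m with
  | zero => intro f j _ _; rfl
  | succ m ih =>
    intro f j hb hz
    have hit : (((0:Nat) : Int)) < t := by push_cast; omega
    have e0 : PySem.List.pyGet? l (j : Int) = some (l.getD j 0) := pyGet_nat l j (by omega)
    have e1 : PySem.List.pyGet? l ((j : Int) + 1) = some (l.getD (j+1) 0) := by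
      have := pyGet_nat l (j+1) (by omega); push_cast at this ⊢; exact this
    have hj0 : l.getD j 0 = 0 := by have := hz 0 (by omega); simpa using this
    rw [show j + (m+1) = (j+1) + m by omega]
    have step : loopA l t (f + (m+1)) j 0 = loopA l t (f + m) (j+1) 0 := by
      show loopA l t ((f + m) + 1) j 0 = _
      rw [loopA, if_pos hit, e0, e1]
      show (if (l.getD j 0 = l.getD (j+1) 0 ∧ l.getD j 0 ≠ 0) then loopA l t (f+m) (j+1) (0+1) else loopA l t (f+m) (j+1) 0) = _
      rw [if_neg (fun h => h.2 hj0)]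
    rw [step]
    exact ih f (j+1) (by omega)
      (by intro k hk; rw [show j + 1 + k = j + (k+1) by omega]; exact hz (k+1) (by omega))

-- A's loop walks through a short non-zero run, resetting the counter at its end
theorem loopA_short (l : List Int) (t : Int) (ht : 1 ≤ t) (v : Int) (hv : v ≠ 0) :
    ∀ m f j i, 1 ≤ m → i + m ≤ t.toNat → j + m < l.length →
    (∀ k < m, l.getD (j + k) 0 = v) → l.getD (j + m) 0 ≠ v →
    loopA l t (f + m) j i = loopA l t f (j + m) 0 := by
  intro m
  induction m with
  | zero => intro f j i h1; omega
  | succ m ih =>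
    intro f j i _ hiT hb hrun hend
    have hit : ((i:Nat) : Int) < t := by omega
    have e0 : PySem.List.pyGet? l (j : Int) = some (l.getD j 0) := pyGet_nat l j (by omega)
    have e1 : PySem.List.pyGet? l ((j : Int) + 1) = some (l.getD (j+1) 0) := by
      have := pyGet_nat l (j+1) (by omega); push_cast at this ⊢; exact this
    have hj0 : l.getD j 0 = v := by have := hrun 0 (by omega); simpa using this
    rw [show j + (m+1) = (j+1) + m by omega]
    by_cases hm : m = 0
    · subst hm
      have hfail : l.getD (j+1) 0 ≠ v := by simpa using hend
      have step : loopA l t (f + (0+1)) j i = loopA l t f (j+1) 0 := by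
        show loopA l t (f + 1) j i = _
        rw [loopA, if_pos hit, e0, e1]
        show (if (l.getD j 0 = l.getD (j+1) 0 ∧ l.getD j 0 ≠ 0) then loopA l t f (j+1) (i+1) else loopA l t f (j+1) 0) = _
        rw [if_neg (fun h => hfail (by rw [← h.1, hj0]))]
      rw [step]
    · have hm1 : 1 ≤ m := by omega
      have hj1 : l.getD (j+1) 0 = v := by have := hrun 1 (by omega); simpa using this
      have step : loopA l t (f + (m+1)) j i = loopA l t (f + m) (j+1) (i+1) := by
        show loopA l t ((f + m) + 1) j i = _
        rw [loopA, if_pos hit, e0, e1]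
        show (if (l.getD j 0 = l.getD (j+1) 0 ∧ l.getD j 0 ≠ 0) then loopA l t (f+m) (j+1) (i+1) else loopA l t (f+m) (j+1) 0) = _
        rw [if_pos ⟨by rw [hj0, hj1], by rw [hj0]; exact hv⟩]
      rw [step]
      exact ih f (j+1) (i+1) hm1 (by omega) (by omega)
        (by intro k hk; rw [show j + 1 + k = j + (k+1) by omega]; exact hrun (k+1) (by omega))
        (by rw [show j + 1 + m = j + (m+1) by omega]; exact hend)

-- runEnd characterisation
theorem runEnd_le (l : List Int) (v : Int) (j : Nat) (h : j ≤ l.length) :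
    runEnd l v j ≤ l.length := by
  fun_induction runEnd l v j with
  | case1 j h hv ih => exact ih (by omega)
  | case2 j h hv => omega
  | case3 j h => omega

theorem runEnd_run (l : List Int) (v : Int) (j : Nat) :
    ∀ k, j ≤ k → k < runEnd l v j → l.getD k 0 = v := by
  fun_induction runEnd l v j with
  | case1 j h hv ih =>
    intro k hk1 hk2
    rcases Nat.eq_or_lt_of_le hk1 with h' | h'
    · exact h' ▸ hv
    · exact ih k h' hk2
  | case2 j h hv => intro k h1 h2; omega
  | case3 j h => intro k h1 h2; omega

theorem runEnd_end (l : List Int) (v : Int) (j : Nat) (hj : j ≤ l.length) :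
    runEnd l v j = l.length ∨ (runEnd l v j < l.length ∧ l.getD (runEnd l v j) 0 ≠ v) := by
  fun_induction runEnd l v j with
  | case1 j h hv ih => exact ih (by omega)
  | case2 j h hv => exact Or.inr ⟨h, hv⟩
  | case3 j h => exact Or.inl (by omega)

def Win (l : List Int) (T : Nat) (s : Nat) : Prop :=
  s + T < l.length ∧ l.getD s 0 ≠ 0 ∧ ∀ k ≤ T, l.getD (s + k) 0 = l.getD s 0

-- main induction, following B's outer loop
theorem main_aux (l : List Int) (t : Int) (ht : 1 ≤ t) :
    ∀ n j, l.length - j ≤ n → (∃ s, j ≤ s ∧ Win l t.toNat s) →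
    loopA l t (l.length + 1 - j) j 0 = outerB l t j := by
  intro n
  induction n with
  | zero =>
    intro j hn ⟨s, hjs, hW⟩
    unfold Win at hW
    obtain ⟨hlen, -, -⟩ := hW
    omega
  | succ n ih =>
    intro j hn ⟨s, hjs, hW⟩
    unfold Win at hW
    obtain ⟨hsW, hsnz, hsrun⟩ := hW
    have hjlen : j < l.length := by omega
    set v := l.getD j 0 with hv
    set r := runEnd l v j with hr
    have hrge : j < r := by
      rw [hr, runEnd, if_pos hjlen, if_pos hv.symm]
      exact Nat.lt_of_lt_of_le (Nat.lt_succ_self j) (runEnd_ge l v (j+1))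
    have hrle : r ≤ l.length := runEnd_le l v j (by omega)
    have hrun : ∀ k, j ≤ k → k < r → l.getD k 0 = v := runEnd_run l v j
    by_cases hq : v ≠ 0 ∧ t + 1 ≤ (r : Int) - (j : Int)
    · -- qualifying run: both return v
      obtain ⟨hvnz, hlong⟩ := hq
      have hTr : j + t.toNat < r := by omega
      have hBeq : outerB l t j = v := by
        rw [outerB, dif_pos hjlen, ← hv, ← hr, if_pos ⟨hvnz, hlong⟩]
      rw [hBeq]
      have hfuel : l.length + 1 - j = (l.length - j - t.toNat) + t.toNat + 1 := by omega
      rw [hfuel, loopA_succ l t ht t.toNat _ j 0 (by omega) (by omega) (by rw [← hv]; exact hvnz)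
          (by intro k hk; rw [← hv, hrun (j+k) (by omega) (by omega)])]
      exact hrun (j + t.toNat) (by omega) hTr
    · -- non-qualifying run: skip it on both sides
      have hsr : r ≤ s := by
        by_contra hcon
        push Not at hcon
        have hsv : l.getD s 0 = v := hrun s hjs hcon
        rcases runEnd_end l v j (by omega) with hend | ⟨hrlt, hrneq⟩
        · rw [← hr] at hend
          exact hq ⟨by rw [← hsv]; exact hsnz, by omega⟩
        · rw [← hr] at hrlt hrneq
          by_cases hrw : r ≤ s + t.toNat
          · have := hsrun (r - s) (by omega)
            rw [show s + (r - s) = r by omega] at this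
            exact hrneq (by rw [this, hsv])
          · exact hq ⟨by rw [← hsv]; exact hsnz, by omega⟩
      have hrlt : r < l.length := by omega
      have hBeq : outerB l t j = outerB l t r := by
        rw [outerB, dif_pos hjlen, ← hv, ← hr, if_neg hq]
      rw [hBeq]
      have hrend : l.getD r 0 ≠ v := by
        rcases runEnd_end l v j (by omega) with h | ⟨-, h⟩
        · rw [← hr] at h; omega
        · rw [← hr] at h; exact h
      have hskip : loopA l t (l.length + 1 - j) j 0 = loopA l t (l.length + 1 - r) r 0 := by
        have hfuel : l.length + 1 - j = (l.length + 1 - r) + (r - j) := by omega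
        by_cases hvz : v = 0
        · rw [hfuel, loopA_zero l t ht (r - j) _ j (by omega)
              (fun k hk => hvz ▸ hrun (j+k) (by omega) (by omega))]
          rw [show j + (r - j) = r by omega]
        · have hshort : (r : Int) - (j : Int) ≤ t := by
            by_contra hc; push Not at hc; exact hq ⟨hvz, by omega⟩
          rw [hfuel, loopA_short l t ht v hvz (r - j) _ j 0 (by omega) (by omega) (by omega)
              (fun k hk => hrun (j+k) (by omega) (by omega))
              (by rw [show j + (r - j) = r by omega]; exact hrend)]
          rw [show j + (r - j) = r by omega]
      rw [hskip]
      exact ih r (by omega) ⟨s, hsr, ⟨hsW, hsnz, hsrun⟩⟩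

-- ===== VERDICT (by name: the statement is the Claim_ definition above) =====
theorem find_plateau_spec : Claim_equal_find_plateau := by
  intro l t _ hpre
  obtain ⟨ht, s, hs, hW, hnz, hrun⟩ := hpre
  unfold Spec_find_plateau find_plateau find_plateau_alt
  rw [if_neg (by omega)]
  have := main_aux l t ht l.length 0 (by omega)
    ⟨s, Nat.zero_le s, hW, hnz, fun k hk => hrun k (List.mem_range.mpr (by omega))⟩
  simpa using this
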